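-- pv_equiv track=rewrite | github.com/TruongHuynhTrungNghia/AnnieLearnPython | ontap3_bai10.py | find
-- ===== SOURCE A (Python) =====
-- def find(item): #3n-1 -> O(n) = n
--     countmax=0
--     count=1
--     for i in range(1,len(item)): #n
--         if item[i-1]*item[i] <0:# them or de xu ly th bang 0
--             count +=1
--         else:
--             if count>countmax: #2n-2
--                 countmax=count
--             count = 1
--     if count>countmax: #1
--         countmax=count
--     return countmax
-- ===== SOURCE B (Python) =====
-- def find(item):
--     # Flag table of sign-alternating adjacencies, then scan it run by run.
--     flags = [item[i - 1] * item[i] < 0 for i in range(1, len(item))]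
--     n = len(flags)
--     best = 0
--     i = 0
--     while i < n:
--         if flags[i]:
--             j = i + 1
--             while j < n and flags[j]:
--                 j += 1
--             run = j - i
--             if run > best:
--                 best = run
--             i = j
--         else:
--             i += 1
--     return best + 1
-- ===== Notes on version B (the rewrite author's own statement) =====
-- stated objective: alternative
-- what changed: Instead of one stateful max/count loop over indices, B first builds the table of sign-alternation flags for adjacent pairs and then scans it run by run, peeling each maximal block of True flags at once and returning the longest such block plus one.
import Mathlib
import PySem

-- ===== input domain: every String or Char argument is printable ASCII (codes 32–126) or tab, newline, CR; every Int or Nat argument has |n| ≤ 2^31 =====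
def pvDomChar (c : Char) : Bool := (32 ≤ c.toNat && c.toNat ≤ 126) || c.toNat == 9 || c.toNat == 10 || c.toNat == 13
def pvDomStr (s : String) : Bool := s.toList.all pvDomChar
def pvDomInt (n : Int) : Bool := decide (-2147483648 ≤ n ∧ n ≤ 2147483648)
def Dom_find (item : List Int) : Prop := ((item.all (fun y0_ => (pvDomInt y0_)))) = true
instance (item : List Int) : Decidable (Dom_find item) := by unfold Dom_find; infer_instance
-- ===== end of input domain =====

-- B: builds the adjacency sign-alternation flag table, then scans it run by run with an index
-- pointer, peeling each maximal block of True flags at once (alternative decomposition; same O(n) cost).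
-- ===== PORT A =====
def find (item : List Int) : Int :=
  let p := (PySem.List.pyRange 1 (item.length : Int) 1).foldl
    (fun (s : Int × Int) i =>
      if PySem.List.pyGetD item (i - 1) 0 * PySem.List.pyGetD item i 0 < 0 then
        (s.1, s.2 + 1)
      else
        (if s.2 > s.1 then s.2 else s.1, 1))
    (0, 1)
  if p.2 > p.1 then p.2 else p.1

-- ===== PORT B =====
-- outer while-loop on the index i; the inner while-loop advances j over the True block starting
-- at i, i.e. j = (i+1) + length of the leading all-True prefix of flags[i+1:]
def scanRuns (flags : List Bool) (i : Nat) (best : Int) : Int :=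
  if h : i < flags.length then
    if flags[i] then
      let j : Nat := (i + 1) + ((flags.drop (i + 1)).takeWhile (fun x => x)).length
      let run : Int := (j : Int) - (i : Int)
      scanRuns flags j (if run > best then run else best)
    else
      scanRuns flags (i + 1) best
  else best
termination_by flags.length - i
decreasing_by
  · omega
  · omega

def find_alt (item : List Int) : Int :=
  let flags := (PySem.List.pyRange 1 (item.length : Int) 1).map
    (fun i => decide (PySem.List.pyGetD item (i - 1) 0 * PySem.List.pyGetD item i 0 < 0))
  scanRuns flags 0 0 + 1

-- ===== PRECONDITION & SPEC =====
def Spec_find (item : List Int) (out : Int) : Prop := out = find_alt item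
instance (item : List Int) (out : Int) : Decidable (Spec_find item out) := by unfold Spec_find; infer_instance

-- ===== CLAIM (what is proved, stated in full; the proofs are below) =====
def Claim_equal_find : Prop := ∀ (item : List Int), Dom_find item → Spec_find item (find item)

-- ===== LEMMAS AND PROOFS =====

-- A's loop body as a fold step over the flag list
def aStep (s : Int × Int) (f : Bool) : Int × Int :=
  if f then (s.1, s.2 + 1) else (if s.2 > s.1 then s.2 else s.1, 1)

-- N flags c = A's final answer starting from countmax = 0, count = c
def N : List Bool → Int → Int
  | [], c => c
  | true :: rest, c => N rest (c + 1)
  | false :: rest, c => max c (N rest 1)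

-- M flags = longest run of consecutive True flags
def M : List Bool → Int
  | [] => 0
  | true :: rest =>
      max (1 + ((rest.takeWhile (fun x => x)).length : Int)) (M (rest.dropWhile (fun x => x)))
  | false :: rest => M rest
termination_by flags => flags.length
decreasing_by
  · simpa using Nat.lt_succ_of_le (List.length_dropWhile_le _ _)
  · simp

-- scanRuns, rephrased structurally on the suffix it still has to visit
def runsList : List Bool → Int → Int
  | [], best => best
  | true :: rest, best =>
      let run : Int := 1 + (rest.takeWhile (fun x => x)).length
      runsList (rest.dropWhile (fun x => x)) (if run > best then run else best)
  | false :: rest, best => runsList rest best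
termination_by flags _ => flags.length
decreasing_by
  · simpa using Nat.lt_succ_of_le (List.length_dropWhile_le _ _)
  · simp

theorem drop_length_takeWhile {α : Type} (p : α → Bool) (l : List α) :
    l.drop (l.takeWhile p).length = l.dropWhile p := by
  induction l with
  | nil => simp
  | cons x xs ih =>
      by_cases hx : p x = true
      · simpa [hx] using ih
      · simp [hx]

theorem scanRuns_eq_runsList (flags : List Bool) (i : Nat) (best : Int) :
    scanRuns flags i best = runsList (flags.drop i) best := by
  fun_induction scanRuns flags i best with
  | case1 i best h hf j run ih =>
      simp only [dite_eq_ite] at ih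
      rw [ih]
      have hdrop : flags.drop i = flags[i] :: flags.drop (i + 1) :=
        List.drop_eq_getElem_cons h
      rw [hdrop, hf, runsList]
      have hj : flags.drop ((i + 1) + ((flags.drop (i + 1)).takeWhile (fun x => x)).length)
          = (flags.drop (i + 1)).dropWhile (fun x => x) := by
        rw [← List.drop_drop, drop_length_takeWhile]
      rw [hj]
      have hrun : run = 1 + (((flags.drop (i + 1)).takeWhile (fun x => x)).length : Int) := by
        simp only [run, j]
        push_cast
        ring
      rw [hrun]
  | case2 i best h hf ih =>
      rw [ih]
      have hdrop : flags.drop i = flags[i] :: flags.drop (i + 1) :=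
        List.drop_eq_getElem_cons h
      have hf' : flags[i] = false := Bool.eq_false_iff.mpr hf
      rw [hdrop, hf', runsList]
  | case3 i best h =>
      rw [List.drop_eq_nil_of_le (by omega), runsList]

theorem M_nonneg (flags : List Bool) : 0 ≤ M flags := by
  induction flags using M.induct with
  | case1 => simp [M]
  | case2 rest ih => simp [M]; omega
  | case3 rest ih => simpa [M] using ih

theorem runsList_eq_max (flags : List Bool) : ∀ best, 0 ≤ best → runsList flags best = max best (M flags) := by
  induction flags using M.induct with
  | case1 => intro best hb; simp [runsList, M]; omega
  | case2 rest ih =>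
      intro best hb
      rw [runsList, ih _ (by split <;> omega)]
      rw [M]
      split <;> omega
  | case3 rest ih => intro best hb; rw [runsList, M, ih _ hb]

theorem afin_foldl (flags : List Bool) : ∀ cm c,
    (if (flags.foldl aStep (cm, c)).2 > (flags.foldl aStep (cm, c)).1 then (flags.foldl aStep (cm, c)).2
     else (flags.foldl aStep (cm, c)).1) = max cm (N flags c) := by
  induction flags with
  | nil => intro cm c; simp [N]; omega
  | cons f rest ih =>
      intro cm c
      cases f with
      | true => simpa [aStep, N] using ih cm (c + 1)
      | false =>
          have h := ih (if c > cm then c else cm) 1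
          simp only [List.foldl_cons, aStep, if_neg (by simp : ¬ (false = true)), N] at h ⊢
          rw [h]
          split <;> omega

-- peel lemma: the longest True run is the leading one or one in the dropped tail
theorem M_peel (flags : List Bool) :
    M flags = max ((flags.takeWhile (fun x => x)).length : Int) (M (flags.dropWhile (fun x => x))) := by
  cases flags with
  | nil => simp [M]
  | cons f rest =>
      cases f with
      | true => simp [M]; omega
      | false =>
          simp only [List.takeWhile_cons, List.dropWhile_cons]
          simp [M]
          have := M_nonneg (false :: rest)
          simp [M] at this ⊢
          omega

theorem N_eq (flags : List Bool) : ∀ c, 1 ≤ c →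
    N flags c = max (c + ((flags.takeWhile (fun x => x)).length : Int)) (1 + M (flags.dropWhile (fun x => x))) := by
  induction flags with
  | nil => intro c hc; simp [N, M]; omega
  | cons f rest ih =>
      intro c hc
      cases f with
      | true =>
          simp only [N, List.takeWhile_cons, List.dropWhile_cons]
          rw [ih (c + 1) (by omega)]
          simp
          omega
      | false =>
          simp only [N, List.takeWhile_cons, List.dropWhile_cons, Bool.false_eq_true,
            if_false, List.length_nil]
          rw [ih 1 le_rfl]
          have hM : M (false :: rest) = M rest := by rw [M]
          have hp := M_peel rest
          have h0 := M_nonneg (rest.dropWhile (fun x => x))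
          omega

theorem main_flags (flags : List Bool) :
    (if (flags.foldl aStep (0, 1)).2 > (flags.foldl aStep (0, 1)).1 then (flags.foldl aStep (0, 1)).2
     else (flags.foldl aStep (0, 1)).1) = scanRuns flags 0 0 + 1 := by
  rw [scanRuns_eq_runsList flags 0 0, List.drop_zero,
    afin_foldl flags 0 1, runsList_eq_max _ _ le_rfl, N_eq _ _ le_rfl, M_peel flags]
  have h0 := M_nonneg (flags.dropWhile (fun x => x))
  omega

-- ===== VERDICT (by name: the statement is the Claim_ definition above) =====
theorem find_spec : Claim_equal_find := by
  intro item _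
  unfold Spec_find find find_alt
  have hbody : (fun (s : Int × Int) (i : Int) =>
      if PySem.List.pyGetD item (i - 1) 0 * PySem.List.pyGetD item i 0 < 0 then (s.1, s.2 + 1)
      else (if s.2 > s.1 then s.2 else s.1, 1))
      = (fun (s : Int × Int) (i : Int) =>
          aStep s (decide (PySem.List.pyGetD item (i - 1) 0 * PySem.List.pyGetD item i 0 < 0))) := by
    funext s i
    simp [aStep]
  show (if ((PySem.List.pyRange 1 (item.length : Int) 1).foldl
        (fun (s : Int × Int) i =>
          if PySem.List.pyGetD item (i - 1) 0 * PySem.List.pyGetD item i 0 < 0 then (s.1, s.2 + 1)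
          else (if s.2 > s.1 then s.2 else s.1, 1)) (0, 1)).2 >
        ((PySem.List.pyRange 1 (item.length : Int) 1).foldl
        (fun (s : Int × Int) i =>
          if PySem.List.pyGetD item (i - 1) 0 * PySem.List.pyGetD item i 0 < 0 then (s.1, s.2 + 1)
          else (if s.2 > s.1 then s.2 else s.1, 1)) (0, 1)).1 then _ else _) = _
  rw [hbody, ← List.foldl_map]
  exact main_flags _
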